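-- pv_equiv track=rewrite | github.com/JoelArg02/Postgres-datamart-dataware-house-ETL-View-main | primer_paso/etl/etl.py | crear_mapeo_id_sensor
-- ===== SOURCE A (Python) =====
-- def crear_mapeo_id_sensor(datos_sensores):
--     mapeo = {}
--     id_sensor = 1  # Comenzar a asignar IDs desde 1
--     for sensor in datos_sensores:
--         tipo_sensor = sensor['tipo_sensor']
--         if tipo_sensor not in mapeo:
--             mapeo[tipo_sensor] = id_sensor
--             id_sensor += 1
--     return mapeo
-- ===== SOURCE B (Python) =====
-- def crear_mapeo_id_sensor(datos_sensores):
--     tipos = [s['tipo_sensor'] for s in datos_sensores]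
--     # Keep each type at its first occurrence; its id is the number of
--     # distinct types seen in the prefix up to (and including) that position.
--     return {t: len(set(tipos[:i + 1]))
--             for i, t in enumerate(tipos)
--             if t not in tipos[:i]}
-- ===== Notes on version B (the rewrite author's own statement) =====
-- stated objective: alternative
-- what changed: Replaces A's fused seen-dict-plus-running-counter loop by a per-position closed form: a type is kept iff it does not occur in the preceding prefix, and its id is the number of distinct types in the prefix up to and including it (no counter, no incremental mapping state); it trades A's linear pass for quadratic prefix scans.
import Mathlib
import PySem

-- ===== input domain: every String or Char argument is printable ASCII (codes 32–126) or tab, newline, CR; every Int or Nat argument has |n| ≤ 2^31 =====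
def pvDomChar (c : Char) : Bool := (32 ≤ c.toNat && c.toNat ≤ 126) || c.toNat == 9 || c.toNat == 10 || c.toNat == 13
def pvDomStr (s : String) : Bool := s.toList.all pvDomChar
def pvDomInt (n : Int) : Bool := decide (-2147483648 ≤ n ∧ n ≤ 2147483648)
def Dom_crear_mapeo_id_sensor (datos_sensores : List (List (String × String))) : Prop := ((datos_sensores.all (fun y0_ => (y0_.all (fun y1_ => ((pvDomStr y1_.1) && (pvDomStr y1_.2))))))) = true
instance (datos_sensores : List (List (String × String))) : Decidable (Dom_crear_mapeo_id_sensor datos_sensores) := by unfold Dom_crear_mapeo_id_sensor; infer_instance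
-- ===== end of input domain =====

-- B drops A's seen-dict-plus-running-counter: per position, a type is kept iff it is absent
-- from the preceding prefix and its id is the distinct count of the prefix up to it; objective: alternative.

-- ===== PORT A =====
-- sensor['tipo_sensor'] raises KeyError when the key is missing; get? returns none there,
-- and Pre_ excludes exactly those inputs, so the `.getD ""` default is never taken under Pre_.
def crear_mapeo_id_sensor (datos_sensores : List (List (String × String))) : List (String × Int) :=
  (datos_sensores.foldl
    (fun (st : PySem.Dict String Int × Int) sensor =>
      let tipo_sensor := ((PySem.Dict.mk sensor).get? "tipo_sensor").getD ""
      if st.1.contains tipo_sensor then st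
      else (st.1.insert tipo_sensor st.2, st.2 + 1))
    (PySem.Dict.empty, 1)).1.items

-- ===== PORT B =====
def crear_mapeo_id_sensor_alt (datos_sensores : List (List (String × String))) : List (String × Int) :=
  let tipos := datos_sensores.map (fun s => ((PySem.Dict.mk s).get? "tipo_sensor").getD "")
  (((PySem.List.enumerate tipos 0).filter
      (fun p => !(PySem.List.slice tipos none (some p.1)).contains p.2)).foldl
    (fun (d : PySem.Dict String Int) p =>
      d.insert p.2
        ((PySem.Set.len (PySem.Set.ofList (PySem.List.slice tipos none (some (p.1 + 1)))) : Int)))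
    PySem.Dict.empty).items

-- ===== PRECONDITION & SPEC =====
-- Pre_ excludes exactly the inputs on which Python A raises KeyError: a sensor without a 'tipo_sensor' key.
def Pre_crear_mapeo_id_sensor (datos_sensores : List (List (String × String))) : Prop :=
  ∀ sensor ∈ datos_sensores, ((PySem.Dict.mk sensor).get? "tipo_sensor").isSome = true
instance (datos_sensores : List (List (String × String))) : Decidable (Pre_crear_mapeo_id_sensor datos_sensores) := by unfold Pre_crear_mapeo_id_sensor; infer_instance
def pvWitness_crear_mapeo_id_sensor : (List (List (String × String))) :=
  [[("tipo_sensor", "temp")], [("tipo_sensor", "hum")], [("tipo_sensor", "temp")]]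
def Spec_crear_mapeo_id_sensor (datos_sensores : List (List (String × String))) (out : List (String × Int)) : Prop := out = crear_mapeo_id_sensor_alt datos_sensores
instance (datos_sensores : List (List (String × String))) (out : List (String × Int)) : Decidable (Spec_crear_mapeo_id_sensor datos_sensores out) := by unfold Spec_crear_mapeo_id_sensor; infer_instance

-- ===== CLAIM (what is proved, stated in full; the proofs are below) =====
def Claim_equal_crear_mapeo_id_sensor : Prop := ∀ (datos_sensores : List (List (String × String))), Dom_crear_mapeo_id_sensor datos_sensores → Pre_crear_mapeo_id_sensor datos_sensores → Spec_crear_mapeo_id_sensor datos_sensores (crear_mapeo_id_sensor datos_sensores)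

-- ===== LEMMAS AND PROOFS =====

-- A's loop body, with the sensor type already extracted.
def pvStep (st : PySem.Dict String Int × Int) (t : String) : PySem.Dict String Int × Int :=
  if st.1.contains t then st else (st.1.insert t st.2, st.2 + 1)

-- The dict A has built after meeting exactly the distinct types `u` (first occurrences, in
-- order): its items are the pairs (type, id) with ids 1..u.length — the swap of `enumerate u 1`.
def pvMap (u : List String) : PySem.Dict String Int :=
  PySem.Dict.mk ((PySem.List.enumerate u 1).map (fun p => (p.2, p.1)))

theorem pvMap_keys (u : List String) : (pvMap u).keys = u := by
  show ((PySem.List.enumerate u 1).map (fun p => (p.2, p.1))).map (fun p => p.1) = u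
  rw [List.map_map]
  exact PySem.List.map_snd_enumerate u 1

theorem pvMap_contains (u : List String) (t : String) :
    (pvMap u).contains t = decide (t ∈ u) := by
  rw [PySem.Dict.contains_eq_decide_mem_keys, pvMap_keys]

theorem pvMap_snoc (u : List String) (t : String) (ht : t ∉ u) :
    (pvMap u).insert t ((u.length : Int) + 1) = pvMap (u ++ [t]) := by
  apply PySem.Dict.ext
  rw [PySem.Dict.items_insert_of_not_contains _ _ (by simp [pvMap_contains, ht])]
  show ((PySem.List.enumerate u 1).map (fun p => (p.2, p.1))) ++ _
      = ((PySem.List.enumerate (u ++ [t]) 1).map (fun p => (p.2, p.1)))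
  rw [PySem.List.enumerate_append]
  simp [PySem.List.enumerate, add_comm]

theorem pvLoop (l u : List String) :
    l.foldl pvStep (pvMap u, (u.length : Int) + 1)
      = (pvMap (PySem.Set.update u l), ((PySem.Set.update u l).length : Int) + 1) := by
  induction l generalizing u with
  | nil => simp [PySem.Set.update]
  | cons t l ih =>
    simp only [List.foldl_cons]
    by_cases ht : t ∈ u
    · have h1 : PySem.Set.update u (t :: l) = PySem.Set.update u l := by
        simp [PySem.Set.update, PySem.Set.add, ht]
      rw [show pvStep (pvMap u, (u.length : Int) + 1) t = (pvMap u, (u.length : Int) + 1) from by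
        simp [pvStep, pvMap_contains, ht], h1]
      exact ih u
    · have h1 : PySem.Set.update u (t :: l) = PySem.Set.update (u ++ [t]) l := by
        simp [PySem.Set.update, PySem.Set.add, ht]
      have h2 : pvStep (pvMap u, (u.length : Int) + 1) t
          = (pvMap (u ++ [t]), ((u ++ [t]).length : Int) + 1) := by
        simp only [pvStep, pvMap_contains, ht, decide_false, Bool.false_eq_true, if_false]
        rw [pvMap_snoc u t ht]
        simp
      rw [h2, h1]
      exact ih (u ++ [t])

-- bounds of the indices produced by enumerate(_, 0)
theorem pvEnumBound (L : List String) :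
    ∀ p ∈ PySem.List.enumerate L 0, 0 ≤ p.1 ∧ p.1 < (L.length : Int) := by
  intro p hp
  have h1 : p.1 ∈ (PySem.List.enumerate L 0).map (fun q => q.1) := List.mem_map_of_mem hp
  rw [PySem.List.map_fst_enumerate] at h1
  have := (PySem.List.mem_pyRange_one).1 h1
  omega

-- B's comprehension equals the swapped enumerate of the ordered dedup, starting at 1.
theorem pvB (L : List String) :
    ((PySem.List.enumerate L 0).filter
        (fun p => !(PySem.List.slice L none (some p.1)).contains p.2)).map
      (fun p => (p.2, (PySem.Set.len (PySem.Set.ofList (PySem.List.slice L none (some (p.1 + 1)))) : Int)))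
      = (PySem.List.enumerate (PySem.List.dedup L) 1).map (fun p => (p.2, p.1)) := by
  induction L using List.reverseRecOn with
  | nil => simp [PySem.List.enumerate, PySem.List.dedup]
  | append_singleton L t ih =>
    have hEnum : PySem.List.enumerate (L ++ [t]) 0
        = PySem.List.enumerate L 0 ++ [((L.length : Int), t)] := by
      rw [PySem.List.enumerate_append]
      simp [PySem.List.enumerate]
    -- on old positions the prefixes of L ++ [t] coincide with those of L
    have hSliceOld : ∀ p ∈ PySem.List.enumerate L 0, ∀ (k : Int), 0 ≤ k → k ≤ p.1 + 1 →
        PySem.List.slice (L ++ [t]) none (some k) = PySem.List.slice L none (some k) := by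
      intro p hp k hk0 hk1
      have hb := pvEnumBound L p hp
      rw [PySem.List.slice_to _ hk0, PySem.List.slice_to _ hk0,
        List.take_append_of_le_length (by omega)]
    have hFiltOld :
        (PySem.List.enumerate L 0).filter
            (fun p => !(PySem.List.slice (L ++ [t]) none (some p.1)).contains p.2)
          = (PySem.List.enumerate L 0).filter
            (fun p => !(PySem.List.slice L none (some p.1)).contains p.2) := by
      apply List.filter_congr
      intro p hp
      rw [hSliceOld p hp p.1 (pvEnumBound L p hp).1 (by omega)]
    have hMapOld : ∀ p ∈ (PySem.List.enumerate L 0).filter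
            (fun p => !(PySem.List.slice L none (some p.1)).contains p.2),
        PySem.List.slice (L ++ [t]) none (some (p.1 + 1)) = PySem.List.slice L none (some (p.1 + 1)) := by
      intro p hp
      have hp' := (List.mem_filter.1 hp).1
      exact hSliceOld p hp' (p.1 + 1) (by have := pvEnumBound L p hp'; omega) (by omega)
    have hTakeL : PySem.List.slice (L ++ [t]) none (some (L.length : Int)) = L := by
      rw [PySem.List.slice_to _ (by positivity)]
      simp
    have hTakeAll : PySem.List.slice (L ++ [t]) none (some ((L.length : Int) + 1)) = L ++ [t] := by
      rw [PySem.List.slice_to _ (by positivity)]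
      rw [List.take_of_length_le (by simp)]
    rw [hEnum, List.filter_append, hFiltOld]
    by_cases ht : t ∈ L
    · have hNew : ([((L.length : Int), t)].filter
          (fun p => !(PySem.List.slice (L ++ [t]) none (some p.1)).contains p.2)) = [] := by
        simp [hTakeL, ht]
      have hDedup : PySem.List.dedup (L ++ [t]) = PySem.List.dedup L := by
        simp only [PySem.List.dedup_eq_ofList]
        rw [PySem.Set.ofList_eq_foldl, List.foldl_append, ← PySem.Set.ofList_eq_foldl]
        simp [PySem.Set.add, PySem.Set.contains, PySem.Set.mem_ofList, ht]
      rw [hNew, List.append_nil, List.map_congr_left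
        (fun p hp => by rw [hMapOld p hp]), ih, hDedup]
    · have hNew : ([((L.length : Int), t)].filter
          (fun p => !(PySem.List.slice (L ++ [t]) none (some p.1)).contains p.2))
            = [((L.length : Int), t)] := by
        simp [hTakeL, ht]
      have hDedup : PySem.List.dedup (L ++ [t]) = PySem.List.dedup L ++ [t] := by
        simp only [PySem.List.dedup_eq_ofList]
        rw [PySem.Set.ofList_eq_foldl, List.foldl_append, ← PySem.Set.ofList_eq_foldl]
        simp [PySem.Set.add, PySem.Set.contains, PySem.Set.mem_ofList, ht]
      have hOf : PySem.Set.ofList (L ++ [t]) = PySem.Set.ofList L ++ [t] := by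
        have := hDedup
        simp only [PySem.List.dedup_eq_ofList] at this
        exact this
      rw [hNew, List.map_append, List.map_congr_left (fun p hp => by rw [hMapOld p hp]), ih,
        hDedup, PySem.List.enumerate_append]
      simp [hTakeAll, hOf, PySem.List.enumerate, add_comm]

-- ===== VERDICT (by name: the statement is the Claim_ definition above) =====
theorem crear_mapeo_id_sensor_spec : Claim_equal_crear_mapeo_id_sensor := by
  intro datos _ _
  show crear_mapeo_id_sensor datos = crear_mapeo_id_sensor_alt datos
  unfold crear_mapeo_id_sensor crear_mapeo_id_sensor_alt
  set tipos := datos.map (fun s => ((PySem.Dict.mk s).get? "tipo_sensor").getD "") with htipos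
  -- A's side: the fold over sensors is the fold of pvStep over the extracted types
  have hm : (datos.foldl
      (fun (st : PySem.Dict String Int × Int) sensor =>
        let tipo_sensor := ((PySem.Dict.mk sensor).get? "tipo_sensor").getD ""
        if st.1.contains tipo_sensor then st
        else (st.1.insert tipo_sensor st.2, st.2 + 1))
      (PySem.Dict.empty, 1))
      = tipos.foldl pvStep (pvMap [], ((([] : List String).length : Int) + 1)) := by
    rw [htipos, List.foldl_map]
    rfl
  rw [hm, pvLoop]
  -- B's side: the comprehension is the same pair list, and the fresh-key fold appends it
  have hpairs := pvB tipos
  have hkeys : (((PySem.List.enumerate tipos 0).filter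
        (fun p => !(PySem.List.slice tipos none (some p.1)).contains p.2)).map
      (fun p => p.2)).Nodup := by
    have : (((PySem.List.enumerate tipos 0).filter
          (fun p => !(PySem.List.slice tipos none (some p.1)).contains p.2)).map
        (fun p => (p.2, (PySem.Set.len (PySem.Set.ofList (PySem.List.slice tipos none (some (p.1 + 1)))) : Int)))).map
        (fun q => q.1)
        = ((PySem.List.enumerate tipos 0).filter
          (fun p => !(PySem.List.slice tipos none (some p.1)).contains p.2)).map (fun p => p.2) := by
      rw [List.map_map]; rfl
    rw [← this, hpairs, List.map_map]
    have : ((PySem.List.enumerate (PySem.List.dedup tipos) 1).map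
        ((fun q : String × Int => q.1) ∘ (fun p : Int × String => (p.2, p.1))))
        = PySem.List.dedup tipos := PySem.List.map_snd_enumerate _ 1
    rw [this]
    exact PySem.List.nodup_dedup tipos
  rw [PySem.Dict.items_foldl_insert_fresh _ _ _ _ (fun a _ => PySem.Dict.contains_empty _) hkeys]
  rw [hpairs]
  simp [pvMap, PySem.Dict.empty, PySem.Set.update, PySem.List.dedup_eq_ofList, PySem.Set.ofList_eq_foldl]
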